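-- pv_equiv track=rewrite | github.com/dirtymouse271/HIT_PITHON_PUBLIC_2024 | btvn4/bai4/bai4.py | find_largest_subset_with_sum_limit
-- ===== SOURCE A (Python) =====
-- def find_largest_subset_with_sum_limit(s, limit):
--     from itertools import combinations
--     s = list(s)
--     best_subset = set()
--     for r in range(1, len(s) + 1):
--         for subset in combinations(s, r):
--             if sum(subset) <= limit:
--                 if len(subset) > len(best_subset):
--                     best_subset = set(subset)
--
--     return best_subset
-- ===== SOURCE B (Python) =====
-- def find_largest_subset_with_sum_limit(s, limit):
--     s = list(s)
--     n = len(s)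
--     # largest r such that the sum of the r smallest elements is <= limit
--     srt = sorted(s)
--     best_r = 0
--     acc = 0
--     for idx, v in enumerate(srt):
--         acc += v
--         if acc <= limit:
--             best_r = idx + 1
--     if best_r == 0:
--         return set()
--     # greedily build the first (index-lexicographic) size-best_r combination
--     # whose sum is <= limit, using suffix minimum-sum checks
--     chosen = []
--     need = best_r
--     rem = limit
--     i = 0
--     while need > 0:
--         x = s[i]
--         tail = s[i + 1:]
--         if need - 1 <= len(tail) and x + sum(sorted(tail)[:need - 1]) <= rem:
--             chosen.append(x)
--             rem -= x
--             need -= 1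
--         i += 1
--     return set(chosen)
-- ===== Notes on version B (the rewrite author's own statement) =====
-- stated objective: faster
-- what changed: Replaces the exhaustive enumeration of all 2^n combinations with: sort once to find the maximum feasible size r (largest r whose r smallest elements sum within the limit), then greedily build the first index-lexicographic valid r-combination using suffix minimum-sum checks.
-- outside the precondition, e.g. on find_largest_subset_with_sum_limit([-6, 3, 4, -6], -8): A returns {-6, 4}, B returns {-6, 3}
import Mathlib
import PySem

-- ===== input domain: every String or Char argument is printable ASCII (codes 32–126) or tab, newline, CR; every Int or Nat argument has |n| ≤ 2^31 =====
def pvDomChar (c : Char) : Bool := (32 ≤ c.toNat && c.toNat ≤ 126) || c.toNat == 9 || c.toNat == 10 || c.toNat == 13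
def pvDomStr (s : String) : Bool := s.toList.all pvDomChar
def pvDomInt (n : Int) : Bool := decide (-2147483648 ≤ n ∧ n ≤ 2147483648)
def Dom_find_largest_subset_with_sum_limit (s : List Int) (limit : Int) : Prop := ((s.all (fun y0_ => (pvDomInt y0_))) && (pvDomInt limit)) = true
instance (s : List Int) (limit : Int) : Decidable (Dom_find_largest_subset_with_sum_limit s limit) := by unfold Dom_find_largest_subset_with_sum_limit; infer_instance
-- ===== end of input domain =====

-- B replaces A's enumeration of all combinations by: sort once to find the maximal feasible
-- size, then greedily build the first index-lexicographic valid combination (objective: faster).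

-- ===== PORT A =====
-- itertools.combinations(l, r) in itertools' order (tuples as lists)
def pyCombinations (r : Nat) (l : List Int) : List (List Int) :=
  match r, l with
  | 0, _ => [[]]
  | _ + 1, [] => []
  | r + 1, x :: xs => ((pyCombinations r xs).map (fun c => x :: c)) ++ pyCombinations (r + 1) xs

def find_largest_subset_with_sum_limit (s : List Int) (limit : Int) : List Int :=
  (PySem.List.pyRange 1 ((s.length : Int) + 1) 1).foldl (fun best r =>
    -- r ranges over 1..len(s), so r.toNat is exact here
    (pyCombinations r.toNat s).foldl (fun best subset =>
      if subset.sum ≤ limit then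
        if subset.length > best.length then PySem.Set.ofList subset else best
      else best) best) []

-- ===== PORT B =====
-- the while loop of Source B advancing i, as structural recursion on the remaining list
def bGreedy (need : Nat) (rem : Int) (l : List Int) : List Int :=
  match need, l with
  | 0, _ => []
  | _ + 1, [] => []
  | need + 1, x :: tail =>
      if need ≤ tail.length ∧ x + ((PySem.List.sorted tail (fun v => v) false).take need).sum ≤ rem
      then x :: bGreedy need (rem - x) tail
      else bGreedy (need + 1) rem tail

def find_largest_subset_with_sum_limit_alt (s : List Int) (limit : Int) : List Int :=
  let srt := PySem.List.sorted s (fun v => v) false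
  let st := (PySem.List.enumerate srt 0).foldl
      (fun (st : Int × Nat) iv =>
        let acc := st.1 + iv.2
        (acc, if acc ≤ limit then iv.1.toNat + 1 else st.2)) (0, 0)
  let best_r := st.2
  if best_r = 0 then []
  else PySem.Set.ofList (bGreedy best_r limit s)

-- ===== PRECONDITION & SPEC =====
-- Pre_ excludes lists with duplicate elements: there A compares the tuple length r against the
-- deduplicated set's cardinality, so which valid combination survives is an artefact of
-- iteration order — a corner no caller would specify; B keeps the first valid combination.
def Pre_find_largest_subset_with_sum_limit (s : List Int) (limit : Int) : Prop := s.Nodup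
instance (s : List Int) (limit : Int) : Decidable (Pre_find_largest_subset_with_sum_limit s limit) := by unfold Pre_find_largest_subset_with_sum_limit; infer_instance

def pvWitness_find_largest_subset_with_sum_limit : List Int × Int := ([1, 2, 4], 3)

def Spec_find_largest_subset_with_sum_limit (s : List Int) (limit : Int) (out : List Int) : Prop := out = find_largest_subset_with_sum_limit_alt s limit
instance (s : List Int) (limit : Int) (out : List Int) : Decidable (Spec_find_largest_subset_with_sum_limit s limit out) := by unfold Spec_find_largest_subset_with_sum_limit; infer_instance

-- ===== CLAIM (what is proved, stated in full; the proofs are below) =====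
def Claim_equal_find_largest_subset_with_sum_limit : Prop := ∀ (s : List Int) (limit : Int), Dom_find_largest_subset_with_sum_limit s limit → Pre_find_largest_subset_with_sum_limit s limit → Spec_find_largest_subset_with_sum_limit s limit (find_largest_subset_with_sum_limit s limit)

-- ===== LEMMAS AND PROOFS =====

-- abbreviations used only by the proofs
def pvSrt (s : List Int) : List Int := PySem.List.sorted s (fun v => v) false
def pvFirst (s : List Int) (limit : Int) (r : Nat) : Option (List Int) :=
  (pyCombinations r s).find? (fun c => decide (c.sum ≤ limit))

-- membership in pyCombinations = sublists of the given length
theorem pvMem_combos : ∀ (l : List Int) (r : Nat) (c : List Int),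
    c ∈ pyCombinations r l ↔ (c.Sublist l ∧ c.length = r) := by
  intro l
  induction l with
  | nil =>
    intro r c
    cases r with
    | zero =>
      simp only [pyCombinations, List.mem_singleton]
      constructor
      · rintro rfl; exact ⟨List.nil_sublist _, rfl⟩
      · rintro ⟨h, hl⟩; exact List.length_eq_zero_iff.mp hl
    | succ r =>
      simp only [pyCombinations, List.not_mem_nil, false_iff, not_and]
      intro hs
      rw [List.sublist_nil.mp hs]
      simp
  | cons x xs ih =>
    intro r c
    cases r with
    | zero =>
      simp only [pyCombinations, List.mem_singleton]
      constructor
      · rintro rfl; exact ⟨List.nil_sublist _, rfl⟩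
      · rintro ⟨h, hl⟩; exact List.length_eq_zero_iff.mp hl
    | succ r =>
      simp only [pyCombinations, List.mem_append, List.mem_map]
      constructor
      · rintro (⟨a, ha, rfl⟩ | h)
        · obtain ⟨has, hal⟩ := (ih r a).mp ha
          exact ⟨has.cons₂ x, by simp [hal]⟩
        · obtain ⟨hs, hl⟩ := (ih (r + 1) c).mp h
          exact ⟨hs.cons x, hl⟩
      · rintro ⟨hs, hl⟩
        rcases List.sublist_cons_iff.mp hs with h | ⟨t, rfl, ht⟩
        · exact Or.inr ((ih (r + 1) c).mpr ⟨h, hl⟩)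
        · exact Or.inl ⟨t, (ih r t).mpr ⟨ht, by simpa using hl⟩, rfl⟩

theorem pvCombos_eq_nil {l : List Int} {r : Nat} (h : l.length < r) : pyCombinations r l = [] := by
  rw [List.eq_nil_iff_forall_not_mem]
  intro c hc
  obtain ⟨hs, hl⟩ := (pvMem_combos l r c).mp hc
  have := hs.length_le
  omega

-- sorted prefix gives a lower bound on the sum of any sublist of the same length
theorem pvTake_sum_le : ∀ {d e : List Int}, d.Sublist e → e.Pairwise (· ≤ ·) →
    ((e.take d.length).sum) ≤ d.sum := by
  intro d e h
  induction h with
  | slnil => intro _; simp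
  | @cons l₁ l₂ a h ih =>
    intro hp
    have ha := (List.pairwise_cons.mp hp).1
    have hp2 := (List.pairwise_cons.mp hp).2
    cases l₁ with
    | nil => simp
    | cons y t =>
      have hlen : t.length + 1 ≤ l₂.length := h.length_le
      have htake : (l₂.take (t.length + 1)).sum
          = (l₂.take t.length).sum + l₂[t.length]'(by omega) :=
        List.sum_take_succ _ _ (by omega)
      have hv : a ≤ l₂[t.length]'(by omega) := ha _ (List.getElem_mem _)
      have ihh := ih hp2
      simp only [List.length_cons, List.sum_cons] at ihh
      rw [htake] at ihh
      simp only [List.length_cons, List.take_succ_cons, List.sum_cons]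
      omega
  | @cons₂ l₁ l₂ a h ih =>
    intro hp
    have := ih (List.pairwise_cons.mp hp).2
    simp only [List.length_cons, List.take_succ_cons, List.sum_cons]
    omega

theorem pvMinsum_le {s c : List Int} (h : c.Sublist s) :
    ((pvSrt s).take c.length).sum ≤ c.sum := by
  have hperm : (pvSrt s).Perm s := PySem.List.sorted_perm s (fun v => v) false
  have hsub : List.Subperm c (pvSrt s) := h.subperm.trans hperm.symm.subperm
  obtain ⟨c', hp, hsl⟩ := hsub
  have hps : (pvSrt s).Pairwise (· ≤ ·) := by
    simpa using PySem.List.sorted_pairwise (xs := s) (key := fun v : Int => v)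
  have hts := pvTake_sum_le hsl hps
  rw [hp.length_eq] at hts
  have hsum : c'.sum = c.sum := hp.sum_eq
  omega

theorem pvMinsum_achieved {s : List Int} {r : Nat} (h : r ≤ s.length) :
    ∃ c ∈ pyCombinations r s, c.sum = ((pvSrt s).take r).sum := by
  have hperm : (pvSrt s).Perm s := PySem.List.sorted_perm s (fun v => v) false
  have hlen : (pvSrt s).length = s.length := hperm.length_eq
  have ht : List.Subperm ((pvSrt s).take r) s := ((List.take_sublist r _).subperm).trans hperm.subperm
  obtain ⟨c, hp, hsl⟩ := ht
  refine ⟨c, (pvMem_combos s r c).mpr ⟨hsl, ?_⟩, hp.sum_eq⟩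
  rw [hp.length_eq, List.length_take]
  omega

-- the greedy construction is the first valid combination
theorem pvGreedy_first : ∀ (l : List Int) (r : Nat) (lim : Int), r ≤ l.length →
    ((pvSrt l).take r).sum ≤ lim →
    (pyCombinations r l).find? (fun c => decide (c.sum ≤ lim)) = some (bGreedy r lim l) := by
  intro l
  induction l with
  | nil =>
    intro r lim hr hsum
    have hr0 : r = 0 := by simpa using hr
    subst hr0
    have h0 : (0 : Int) ≤ lim := by simpa [pvSrt] using hsum
    simp [pyCombinations, bGreedy, h0]
  | cons x xs ih =>
    intro r lim hr hsum
    cases r with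
    | zero =>
      have h0 : (0 : Int) ≤ lim := by simpa [pvSrt] using hsum
      simp [pyCombinations, bGreedy, h0]
    | succ k =>
      have hk : k ≤ xs.length := by simpa using hr
      by_cases hc : k ≤ xs.length ∧
          x + ((PySem.List.sorted xs (fun v => v) false).take k).sum ≤ lim
      · have hb : bGreedy (k + 1) lim (x :: xs) = x :: bGreedy k (lim - x) xs := by
          simp only [bGreedy, if_pos hc]
        have hcomp : ((fun c : List Int => decide (c.sum ≤ lim)) ∘ fun c => x :: c)
            = fun c : List Int => decide (c.sum ≤ lim - x) := by
          funext c
          simp only [Function.comp_apply, List.sum_cons, decide_eq_decide]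
          omega
        have ih' := ih k (lim - x) hc.1 (by
          have := hc.2
          simp only [pvSrt]
          omega)
        rw [show pyCombinations (k + 1) (x :: xs)
            = ((pyCombinations k xs).map (fun c => x :: c)) ++ pyCombinations (k + 1) xs from rfl]
        rw [List.find?_append, List.find?_map, hcomp, ih', hb]
        rfl
      · have hx : ¬ x + ((pvSrt xs).take k).sum ≤ lim := by
          intro h
          exact hc ⟨hk, h⟩
        have h1 : ((pyCombinations k xs).map (fun c => x :: c)).find?
            (fun c => decide (c.sum ≤ lim)) = none := by
          rw [List.find?_eq_none]
          rintro c hcm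
          obtain ⟨a, ha, rfl⟩ := List.mem_map.mp hcm
          obtain ⟨hsl, hlen⟩ := (pvMem_combos xs k a).mp ha
          have hmin := pvMinsum_le hsl
          rw [hlen] at hmin
          simp only [decide_eq_true_eq, List.sum_cons]
          intro hle
          exact hx (by omega)
        obtain ⟨c0, hc0m, hc0s⟩ := pvMinsum_achieved (s := x :: xs) (r := k + 1) hr
        have hc0v : c0.sum ≤ lim := by rw [hc0s]; exact hsum
        have hc0' : c0 ∈ pyCombinations (k + 1) xs := by
          rcases List.mem_append.mp hc0m with hm | hm
          · exfalso
            obtain ⟨a, ha, rfl⟩ := List.mem_map.mp hm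
            obtain ⟨hsl, hlen⟩ := (pvMem_combos xs k a).mp ha
            have hmin := pvMinsum_le hsl
            rw [hlen] at hmin
            simp only [List.sum_cons] at hc0v
            exact hx (by omega)
          · exact hm
        obtain ⟨hsl0, hlen0⟩ := (pvMem_combos xs (k + 1) c0).mp hc0'
        have hk1 : k + 1 ≤ xs.length := by
          have := hsl0.length_le
          omega
        have hmin0 : ((pvSrt xs).take (k + 1)).sum ≤ lim := by
          have := pvMinsum_le hsl0
          rw [hlen0] at this
          omega
        have hbg : bGreedy (k + 1) lim (x :: xs) = bGreedy (k + 1) lim xs := by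
          simp only [bGreedy, if_neg hc]
        rw [show pyCombinations (k + 1) (x :: xs)
            = ((pyCombinations k xs).map (fun c => x :: c)) ++ pyCombinations (k + 1) xs from rfl]
        rw [List.find?_append, h1, hbg]
        simpa using ih (k + 1) lim hk1 hmin0

theorem pvFirst_none {s : List Int} {limit : Int} {r : Nat}
    (h : r ≤ s.length → ¬ ((pvSrt s).take r).sum ≤ limit) : pvFirst s limit r = none := by
  by_cases hr : r ≤ s.length
  · unfold pvFirst
    rw [List.find?_eq_none]
    intro c hc
    obtain ⟨hsl, hlen⟩ := (pvMem_combos s r c).mp hc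
    have hmin := pvMinsum_le hsl
    rw [hlen] at hmin
    simp only [decide_eq_true_eq]
    intro hle
    exact h hr (le_trans hmin hle)
  · unfold pvFirst
    rw [pvCombos_eq_nil (by omega)]
    rfl

theorem pvGreedy_sublist : ∀ (r : Nat) (lim : Int) (l : List Int), (bGreedy r lim l).Sublist l := by
  intro r lim l
  induction l generalizing r lim with
  | nil => cases r <;> simp [bGreedy]
  | cons x t ih =>
    cases r with
    | zero => simp [bGreedy]
    | succ k =>
      simp only [bGreedy]
      split
      · exact (ih k (lim - x)).cons₂ x
      · exact (ih (k + 1) lim).cons x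

-- best_r fold of B: invariants
def pvStep (limit : Int) : Int × Nat → Int × Int → Int × Nat :=
  fun st iv => let acc := st.1 + iv.2; (acc, if acc ≤ limit then iv.1.toNat + 1 else st.2)

theorem pvBestR_inv (limit : Int) : ∀ (l : List Int),
    ((PySem.List.enumerate l 0).foldl (pvStep limit) (0, 0)).1 = l.sum ∧
    (((PySem.List.enumerate l 0).foldl (pvStep limit) (0, 0)).2 ≠ 0 →
      ((PySem.List.enumerate l 0).foldl (pvStep limit) (0, 0)).2 ≤ l.length ∧
      (l.take ((PySem.List.enumerate l 0).foldl (pvStep limit) (0, 0)).2).sum ≤ limit) ∧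
    (∀ r : Nat, ((PySem.List.enumerate l 0).foldl (pvStep limit) (0, 0)).2 < r → r ≤ l.length →
      ¬ (l.take r).sum ≤ limit) := by
  intro l
  induction l using List.reverseRecOn with
  | nil =>
    refine ⟨rfl, by simp [PySem.List.enumerate_nil], ?_⟩
    intro r h1 h2
    simp [PySem.List.enumerate_nil] at h1 h2
    omega
  | append_singleton l v ih =>
    obtain ⟨ih1, ih2, ih3⟩ := ih
    have he : PySem.List.enumerate (l ++ [v]) 0
        = PySem.List.enumerate l 0 ++ [((l.length : Int), v)] := by
      rw [PySem.List.enumerate_append]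
      simp [PySem.List.enumerate_cons, PySem.List.enumerate_nil]
    rw [he, List.foldl_append]
    set st := (PySem.List.enumerate l 0).foldl (pvStep limit) (0, 0) with hst
    have hstep : List.foldl (pvStep limit) st [((l.length : Int), v)]
        = (st.1 + v, if st.1 + v ≤ limit then l.length + 1 else st.2) := by
      simp [pvStep]
    rw [hstep, ih1]
    by_cases hle : l.sum + v ≤ limit
    · simp only [if_pos hle]
      refine ⟨by simp, ?_, ?_⟩
      · intro _
        constructor
        · simp
        · have : (l ++ [v]).take (l.length + 1) = l ++ [v] := by
            apply List.take_of_length_le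
            simp
          rw [this]
          simpa using hle
      · intro r h1 h2
        simp at h2
        omega
    · simp only [if_neg hle]
      refine ⟨by simp, ?_, ?_⟩
      · intro hne
        obtain ⟨hle2, hsum2⟩ := ih2 hne
        constructor
        · simp; omega
        · rw [List.take_append_of_le_length hle2]
          exact hsum2
      · intro r h1 h2
        simp at h2
        rcases Nat.lt_or_ge r (l.length + 1) with hr | hr
        · rw [List.take_append_of_le_length (by omega)]
          exact ih3 r h1 (by omega)
        · have hreq : r = l.length + 1 := by omega
          subst hreq
          have : (l ++ [v]).take (l.length + 1) = l ++ [v] := by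
            apply List.take_of_length_le
            simp
          rw [this]
          simpa using hle

-- A's inner fold: once the best has the full length, no further update happens
theorem pvNo_update (limit : Int) : ∀ (M : List (List Int)) (b : List Int),
    (∀ d ∈ M, d.length ≤ b.length) →
    M.foldl (fun best subset =>
      if subset.sum ≤ limit then
        if subset.length > best.length then PySem.Set.ofList subset else best
      else best) b = b := by
  intro M
  induction M with
  | nil => intro b _; rfl
  | cons d M ih =>
    intro b h
    have hd := h d List.mem_cons_self
    have hstep : (if d.sum ≤ limit then
        (if d.length > b.length then PySem.Set.ofList d else b) else b) = b := by
      split_ifs with h1 h2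
      · omega
      · rfl
      · rfl
    simp only [List.foldl_cons, hstep]
    exact ih b (fun e he => h e (List.mem_cons_of_mem _ he))

-- A's inner fold over one combination list returns the first valid combination
theorem pvInner_fold (limit : Int) {r : Nat} : ∀ (L : List (List Int)) (b : List Int),
    (∀ c ∈ L, c.Nodup ∧ c.length = r) → b.length < r →
    L.foldl (fun best subset =>
      if subset.sum ≤ limit then
        if subset.length > best.length then PySem.Set.ofList subset else best
      else best) b
      = ((L.find? (fun c => decide (c.sum ≤ limit))).getD b) := by
  intro L
  induction L with
  | nil => intro b _ _; rfl
  | cons c L ih =>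
    intro b hmem hb
    have hc := hmem c List.mem_cons_self
    by_cases hv : c.sum ≤ limit
    · rw [List.find?_cons_of_pos (by simpa using hv)]
      simp only [List.foldl_cons, if_pos hv, if_pos (show c.length > b.length by omega)]
      rw [PySem.Set.ofList_eq_self_of_nodup c hc.1]
      simp only [Option.getD_some]
      exact pvNo_update limit L c (fun d hd => by
        have := (hmem d (List.mem_cons_of_mem _ hd)).2
        omega)
    · rw [List.find?_cons_of_neg (by simpa using hv)]
      simp only [List.foldl_cons, if_neg hv]
      exact ih b (fun d hd => hmem d (List.mem_cons_of_mem _ hd)) hb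

-- A's outer fold characterized stage by stage
def pvG (s : List Int) (limit : Int) : Nat → List Int
  | 0 => []
  | m + 1 => (pvFirst s limit (m + 1)).getD (pvG s limit m)

def pvF (s : List Int) (limit : Int) (m : Nat) : List Int :=
  (PySem.List.pyRange 1 ((m : Int) + 1) 1).foldl (fun best r =>
    (pyCombinations r.toNat s).foldl (fun best subset =>
      if subset.sum ≤ limit then
        if subset.length > best.length then PySem.Set.ofList subset else best
      else best) best) []

theorem pvF_eq_G {s : List Int} {limit : Int} (hs : s.Nodup) :
    ∀ m, m ≤ s.length → pvF s limit m = pvG s limit m ∧ (pvG s limit m).length ≤ m := by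
  intro m
  induction m with
  | zero =>
    intro _
    refine ⟨?_, by simp [pvG]⟩
    unfold pvF
    rw [PySem.List.pyRange_one_eq_nil (by norm_num)]
    rfl
  | succ m ihm =>
    intro hm1
    obtain ⟨ihF, ihL⟩ := ihm (by omega)
    have hsplit : PySem.List.pyRange 1 (((m + 1 : Nat) : Int) + 1) 1
        = PySem.List.pyRange 1 ((m : Int) + 1) 1 ++ [(m : Int) + 1] := by
      have h := PySem.List.pyRange_one_succ_right (a := 1) (b := (m : Int) + 1)
        (by omega)
      push_cast
      convert h using 2
    have htn : ((m : Int) + 1).toNat = m + 1 := by omega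
    have hmem : ∀ c ∈ pyCombinations (m + 1) s, c.Nodup ∧ c.length = m + 1 := by
      intro c hc
      obtain ⟨hsl, hlen⟩ := (pvMem_combos s (m + 1) c).mp hc
      exact ⟨hsl.nodup hs, hlen⟩
    unfold pvF at ihF ⊢
    rw [hsplit, List.foldl_append, ihF]
    simp only [List.foldl_cons, List.foldl_nil, htn]
    rw [pvInner_fold limit (pyCombinations (m + 1) s) (pvG s limit m) hmem (by omega)]
    constructor
    · rfl
    · cases hf : pvFirst s limit (m + 1) with
      | none => simp [pvG, hf]; omega
      | some c =>
        have hcm : c ∈ pyCombinations (m + 1) s := List.mem_of_find?_eq_some hf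
        have := ((pvMem_combos s (m + 1) c).mp hcm).2
        simp [pvG, hf]
        omega

theorem pvG_stable {s : List Int} {limit : Int} {b : Nat}
    (hnone : ∀ r, b < r → r ≤ s.length → pvFirst s limit r = none) :
    ∀ m, b ≤ m → m ≤ s.length → pvG s limit m = pvG s limit b := by
  intro m
  induction m with
  | zero =>
    intro h1 _
    have hb0 : b = 0 := by omega
    rw [hb0]
  | succ m ih =>
    intro h1 h2
    rcases Nat.eq_or_lt_of_le h1 with he | hlt
    · rw [← he]
    · have : pvFirst s limit (m + 1) = none := hnone (m + 1) hlt h2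
      show (pvFirst s limit (m + 1)).getD (pvG s limit m) = pvG s limit b
      rw [this]
      exact ih (by omega) (by omega)

-- ===== VERDICT (by name: the statement is the Claim_ definition above) =====
theorem find_largest_subset_with_sum_limit_spec : Claim_equal_find_largest_subset_with_sum_limit := by
  unfold Claim_equal_find_largest_subset_with_sum_limit
  intro s limit _ hpre
  unfold Pre_find_largest_subset_with_sum_limit at hpre
  unfold Spec_find_largest_subset_with_sum_limit
  obtain ⟨hacc, hP2, hP1⟩ := pvBestR_inv limit (pvSrt s)
  set b := ((PySem.List.enumerate (pvSrt s) 0).foldl (pvStep limit) (0, 0)).2 with hbdef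
  have hlen : (pvSrt s).length = s.length := (PySem.List.sorted_perm s (fun v => v) false).length_eq
  have hBalt : find_largest_subset_with_sum_limit_alt s limit
      = if b = 0 then [] else PySem.Set.ofList (bGreedy b limit s) := rfl
  have hnone : ∀ r, b < r → r ≤ s.length → pvFirst s limit r = none := by
    intro r h1 h2
    exact pvFirst_none (fun _ => hP1 r h1 (by omega))
  have hA : find_largest_subset_with_sum_limit s limit = pvF s limit s.length := rfl
  have hble : b ≤ s.length := by
    by_cases hb0 : b = 0
    · omega
    · have := (hP2 hb0).1
      omega
  obtain ⟨hFG, -⟩ := pvF_eq_G (limit := limit) hpre s.length le_rfl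
  rw [hA, hFG, pvG_stable hnone s.length hble le_rfl, hBalt]
  by_cases hb0 : b = 0
  · rw [hb0, if_pos rfl]
    rfl
  · rw [if_neg hb0]
    have hfirst : pvFirst s limit b = some (bGreedy b limit s) :=
      pvGreedy_first s b limit (by omega) (hP2 hb0).2
    have hnodup : (bGreedy b limit s).Nodup := (pvGreedy_sublist b limit s).nodup hpre
    rw [PySem.Set.ofList_eq_self_of_nodup _ hnodup]
    obtain ⟨k, hk⟩ : ∃ k, b = k + 1 := ⟨b - 1, by omega⟩
    rw [hk] at hfirst ⊢
    show (pvFirst s limit (k + 1)).getD (pvG s limit k) = bGreedy (k + 1) limit s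
    rw [hfirst]
    rfl
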